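-- pv_equiv track=rewrite | github.com/BlokusPokus/ai_assistant | src/personal_assistant/types/state_phase2.py | _create_simple_summary
-- ===== SOURCE A (Python) =====
-- from typing import Any, Dict, List, Optional, Set, Tuple
--
-- def _create_simple_summary(items: List[Dict[str, Any]]) -> Dict[str, Any]:
--     """Create a simple summary when hierarchical summarization is disabled"""
--     user_messages = [item for item in items if item.get('role') == 'user']
--     assistant_messages = [
--         item for item in items if item.get('role') == 'assistant']
--     tool_calls = [item for item in items if item.get('role') == 'tool']
--
--     summary_content = f"Previous conversation: {len(user_messages)} user messages, {len(assistant_messages)} assistant responses, {len(tool_calls)} tool calls"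
--
--     return {
--         "role": "system",
--         "content": summary_content,
--         "type": "conversation_summary"
--     }
-- ===== SOURCE B (Python) =====
-- from typing import Any, Dict, List
--
-- def _create_simple_summary(items: List[Dict[str, Any]]) -> Dict[str, Any]:
--     """Create a simple summary when hierarchical summarization is disabled"""
--     counts = {}
--     for item in items:
--         r = item.get('role')
--         counts[r] = counts.get(r, 0) + 1
--     summary_content = (
--         f"Previous conversation: {counts.get('user', 0)} user messages, "
--         f"{counts.get('assistant', 0)} assistant responses, "
--         f"{counts.get('tool', 0)} tool calls"
--     )
--     return {
--         "role": "system",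
--         "content": summary_content,
--         "type": "conversation_summary",
--     }
-- ===== Notes on version B (the rewrite author's own statement) =====
-- stated objective: idiomatic
-- what changed: Replaced three separate filtering list comprehensions over the whole input with one pass that builds a role->count table, then reads the three counts from it.
import Mathlib
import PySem

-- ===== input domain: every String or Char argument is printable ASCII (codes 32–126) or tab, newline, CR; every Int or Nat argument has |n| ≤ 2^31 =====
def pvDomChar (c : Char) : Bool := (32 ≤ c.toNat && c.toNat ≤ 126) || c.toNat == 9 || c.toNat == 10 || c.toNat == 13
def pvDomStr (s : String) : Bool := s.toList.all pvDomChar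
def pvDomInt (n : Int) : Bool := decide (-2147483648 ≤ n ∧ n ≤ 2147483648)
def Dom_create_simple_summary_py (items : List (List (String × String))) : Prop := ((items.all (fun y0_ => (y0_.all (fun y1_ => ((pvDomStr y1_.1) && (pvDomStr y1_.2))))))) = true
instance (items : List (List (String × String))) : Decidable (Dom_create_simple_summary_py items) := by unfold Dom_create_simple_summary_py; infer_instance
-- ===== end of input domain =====

-- B builds one role→count table in a single pass instead of A's three filtering scans (idiomatic; same result).

-- ===== PORT A =====
def create_simple_summary_py (items : List (List (String × String))) : List (String × String) :=
  let user_messages := items.filter (fun item => (PySem.Dict.mk item).get? "role" == some "user")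
  let assistant_messages := items.filter (fun item => (PySem.Dict.mk item).get? "role" == some "assistant")
  let tool_calls := items.filter (fun item => (PySem.Dict.mk item).get? "role" == some "tool")
  let summary_content :=
    "Previous conversation: " ++ PySem.Int.toStr (user_messages.length : Int) ++ " user messages, "
      ++ PySem.Int.toStr (assistant_messages.length : Int) ++ " assistant responses, "
      ++ PySem.Int.toStr (tool_calls.length : Int) ++ " tool calls"
  [("role", "system"), ("content", summary_content), ("type", "conversation_summary")]

-- ===== PORT B =====
def create_simple_summary_py_alt (items : List (List (String × String))) : List (String × String) :=
  let counts : PySem.Dict (Option String) Int :=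
    items.foldl (fun d item =>
      let r := (PySem.Dict.mk item).get? "role"
      d.insert r (d.getD r 0 + 1)) PySem.Dict.empty
  let summary_content :=
    "Previous conversation: " ++ PySem.Int.toStr (counts.getD (some "user") 0) ++ " user messages, "
      ++ PySem.Int.toStr (counts.getD (some "assistant") 0) ++ " assistant responses, "
      ++ PySem.Int.toStr (counts.getD (some "tool") 0) ++ " tool calls"
  [("role", "system"), ("content", summary_content), ("type", "conversation_summary")]

-- ===== PRECONDITION & SPEC =====
def Spec_create_simple_summary_py (items : List (List (String × String))) (out : List (String × String)) : Prop := out = create_simple_summary_py_alt items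
instance (items : List (List (String × String))) (out : List (String × String)) : Decidable (Spec_create_simple_summary_py items out) := by unfold Spec_create_simple_summary_py; infer_instance

-- ===== CLAIM (what is proved, stated in full; the proofs are below) =====
def Claim_equal_create_simple_summary_py : Prop := ∀ (items : List (List (String × String))), Dom_create_simple_summary_py items → Spec_create_simple_summary_py items (create_simple_summary_py items)

-- ===== LEMMAS AND PROOFS =====

-- B's counter lookup equals A's filter length, for each role value.
theorem pv_count_eq (items : List (List (String × String))) (a : Option String) :
    (items.foldl (fun (d : PySem.Dict (Option String) Int) item =>
        let r := (PySem.Dict.mk item).get? "role"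
        d.insert r (d.getD r 0 + 1)) PySem.Dict.empty).getD a 0
      = ((items.filter (fun item => (PySem.Dict.mk item).get? "role" == a)).length : Int) := by
  have h := PySem.Dict.getD_foldl_insert_add_one
      (l := items.map (fun item => (PySem.Dict.mk item).get? "role"))
      (d := PySem.Dict.empty) (v := a)
  rw [List.foldl_map] at h
  simp only [h, PySem.Dict.getD_empty, zero_add]
  rw [List.count_eq_countP, List.countP_map, ← List.countP_eq_length_filter]
  rfl

-- ===== VERDICT (by name: the statement is the Claim_ definition above) =====
theorem create_simple_summary_py_spec : Claim_equal_create_simple_summary_py := by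
  intro items _
  unfold Spec_create_simple_summary_py create_simple_summary_py create_simple_summary_py_alt
  simp only [pv_count_eq]
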